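-- pv_equiv track=rewrite | github.com/adrmisty/hmm-pos-tagger | heuristics.py | _nl_multiword_propn
-- ===== SOURCE A (Python) =====
-- from typing import List, Tuple
--
-- TaggedSentence = List[Tuple[str, str]]
--
-- def _nl_multiword_propn(sentence: TaggedSentence) -> TaggedSentence:
--     """
--     Dutch-specific heuristic:
--     Promote NOUN -> PROPN for capitalized multi-word proper nouns.
--
--     Rule (same logic as English, but gated to lang='nl'):
--         If a token is tagged as NOUN and:
--           - it starts with a capital letter (and not a digit), AND
--           - it is adjacent to a token tagged as PROPN that also starts
--             with a capital letter,
--         then relabel it as PROPN.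
--
--     This aims to capture things like:
--         - 'Koninklijke Bibliotheek'
--         - 'San Francisco Bay'
--     while avoiding lowercase noun-noun compounds.
--     """
--
--     def _is_capitalized(w: str) -> bool:
--         return bool(w) and w[0].isupper() and not w[0].isdigit()
--
--     new_sentence: TaggedSentence = []
--
--     for i, (word, tag) in enumerate(sentence):
--         new_tag = tag
--
--         if tag == 'NOUN' and _is_capitalized(word):
--             prev_is_cap_propn = (
--                 i > 0
--                 and sentence[i - 1][1] == 'PROPN'
--                 and _is_capitalized(sentence[i - 1][0])
--             )
--             next_is_cap_propn = (
--                 i < len(sentence) - 1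
--                 and sentence[i + 1][1] == 'PROPN'
--                 and _is_capitalized(sentence[i + 1][0])
--             )
--
--             if prev_is_cap_propn or next_is_cap_propn:
--                 new_tag = 'PROPN'
--
--         new_sentence.append((word, new_tag))
--
--     return new_sentence
-- ===== SOURCE B (Python) =====
-- def _nl_multiword_propn(sentence):
--     def _is_capitalized(w):
--         return bool(w) and w[0].isupper() and not w[0].isdigit()
--
--     # Pass 1: anchor-driven marking — each capitalized PROPN marks its two
--     # neighbour positions as promotion candidates.
--     promote = set()
--     for j, (word, tag) in enumerate(sentence):
--         if tag == 'PROPN' and _is_capitalized(word):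
--             promote.add(j - 1)
--             promote.add(j + 1)
--
--     # Pass 2: a marked position holding a capitalized NOUN becomes PROPN.
--     return [(w, 'PROPN') if (i in promote and t == 'NOUN' and _is_capitalized(w))
--             else (w, t)
--             for i, (w, t) in enumerate(sentence)]
-- ===== Notes on version B (the rewrite author's own statement) =====
-- stated objective: alternative
-- what changed: B inverts the traversal direction: instead of A's candidate-driven single pass that re-inspects both neighbours of every capitalized NOUN, B first lets every capitalized PROPN anchor mark its two neighbour indices in a set, then promotes exactly the marked positions that hold a capitalized NOUN.
import Mathlib
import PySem

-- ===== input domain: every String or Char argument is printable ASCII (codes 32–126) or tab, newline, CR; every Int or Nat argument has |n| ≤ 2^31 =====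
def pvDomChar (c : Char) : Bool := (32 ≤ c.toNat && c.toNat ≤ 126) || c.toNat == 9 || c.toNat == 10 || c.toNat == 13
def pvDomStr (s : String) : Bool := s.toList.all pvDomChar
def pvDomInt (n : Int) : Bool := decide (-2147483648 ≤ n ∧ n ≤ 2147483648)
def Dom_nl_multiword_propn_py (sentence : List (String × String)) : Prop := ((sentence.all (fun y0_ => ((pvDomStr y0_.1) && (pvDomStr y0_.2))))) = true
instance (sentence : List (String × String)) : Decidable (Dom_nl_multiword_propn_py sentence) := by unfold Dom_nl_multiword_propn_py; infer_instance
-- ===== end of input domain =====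

-- B inverts the traversal: capitalized PROPN anchors mark their neighbour indices in a set,
-- then marked capitalized NOUNs are promoted; same O(n) cost (objective: alternative).

-- ===== PORT A =====
-- helper _is_capitalized (shared by both Pythons verbatim)
def pyIsCap (w : String) : Bool :=
  match w.toList with
  | [] => false
  | c :: _ => PySem.Chars.isupper c && !(PySem.Chars.isdigit c)

def nl_multiword_propn_py (sentence : List (String × String)) : List (String × String) :=
  (PySem.List.enumerate sentence).foldl (fun new_sentence p =>
    let i := p.1
    let word := p.2.1
    let tag := p.2.2
    let new_tag :=
      if tag == "NOUN" && pyIsCap word then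
        let prev_is_cap_propn :=
          decide (0 < i) && (PySem.List.pyGetD sentence (i - 1) ("", "")).2 == "PROPN"
            && pyIsCap (PySem.List.pyGetD sentence (i - 1) ("", "")).1
        let next_is_cap_propn :=
          decide (i < (sentence.length : Int) - 1)
            && (PySem.List.pyGetD sentence (i + 1) ("", "")).2 == "PROPN"
            && pyIsCap (PySem.List.pyGetD sentence (i + 1) ("", "")).1
        if prev_is_cap_propn || next_is_cap_propn then "PROPN" else tag
      else tag
    new_sentence ++ [(word, new_tag)]) []

-- ===== PORT B =====
def nl_multiword_propn_py_alt (sentence : List (String × String)) : List (String × String) :=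
  -- Pass 1: each capitalized PROPN anchor marks its two neighbour indices
  let promote : PySem.Set Int :=
    (PySem.List.enumerate sentence).foldl (fun s p =>
      if p.2.2 == "PROPN" && pyIsCap p.2.1 then
        PySem.Set.add (PySem.Set.add s (p.1 - 1)) (p.1 + 1)
      else s) PySem.Set.empty
  -- Pass 2: promote the marked positions holding a capitalized NOUN
  (PySem.List.enumerate sentence).map (fun p =>
    if PySem.Set.contains promote p.1 && p.2.2 == "NOUN" && pyIsCap p.2.1
    then (p.2.1, "PROPN") else (p.2.1, p.2.2))

-- ===== PRECONDITION & SPEC =====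
def Spec_nl_multiword_propn_py (sentence : List (String × String)) (out : List (String × String)) : Prop := out = nl_multiword_propn_py_alt sentence
instance (sentence : List (String × String)) (out : List (String × String)) : Decidable (Spec_nl_multiword_propn_py sentence out) := by unfold Spec_nl_multiword_propn_py; infer_instance

-- ===== CLAIM (what is proved, stated in full; the proofs are below) =====
def Claim_equal_nl_multiword_propn_py : Prop := ∀ (sentence : List (String × String)), Dom_nl_multiword_propn_py sentence → Spec_nl_multiword_propn_py sentence (nl_multiword_propn_py sentence)

-- ===== LEMMAS AND PROOFS =====

-- membership in the anchor fold over an arbitrary pair list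
theorem mem_mark_foldl (l : List (Int × (String × String))) (s : PySem.Set Int) (i : Int) :
    i ∈ l.foldl (fun s p =>
        if p.2.2 == "PROPN" && pyIsCap p.2.1 then
          PySem.Set.add (PySem.Set.add s (p.1 - 1)) (p.1 + 1)
        else s) s
      ↔ i ∈ s ∨ ∃ p ∈ l, (p.2.2 == "PROPN" && pyIsCap p.2.1) = true ∧ (i = p.1 - 1 ∨ i = p.1 + 1) := by
  induction l generalizing s with
  | nil => simp
  | cons a l ih =>
    simp only [List.foldl_cons, ih, List.mem_cons]
    by_cases h : (a.2.2 == "PROPN" && pyIsCap a.2.1) = true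
    · simp only [h, if_pos, PySem.Set.mem_add]
      constructor
      · rintro (((hs | h1) | h2) | ⟨p, hpl, hc, hi⟩)
        · exact Or.inl hs
        · exact Or.inr ⟨a, Or.inl rfl, h, Or.inl h1⟩
        · exact Or.inr ⟨a, Or.inl rfl, h, Or.inr h2⟩
        · exact Or.inr ⟨p, Or.inr hpl, hc, hi⟩
      · rintro (hs | ⟨p, (rfl | hpl), hc, hi⟩)
        · exact Or.inl (Or.inl (Or.inl hs))
        · rcases hi with h1 | h2
          · exact Or.inl (Or.inl (Or.inr h1))
          · exact Or.inl (Or.inr h2)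
        · exact Or.inr ⟨p, hpl, hc, hi⟩
    · simp only [h, if_neg, Bool.false_eq_true, not_false_iff]
      constructor
      · rintro (hs | ⟨p, hpl, hc, hi⟩)
        · exact Or.inl hs
        · exact Or.inr ⟨p, Or.inr hpl, hc, hi⟩
      · rintro (hs | ⟨p, (rfl | hpl), hc, hi⟩)
        · exact Or.inl hs
        · exact absurd hc h
        · exact Or.inr ⟨p, hpl, hc, hi⟩

-- abbreviation for the per-index anchor test
def capPropnAt (sentence : List (String × String)) (k : Nat) (h : k < sentence.length) : Bool :=
  sentence[k].2 == "PROPN" && pyIsCap sentence[k].1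

-- the mark-set membership at a valid index k is exactly A's neighbour disjunction
theorem contains_promote (sentence : List (String × String)) (k : Nat) (hk : k < sentence.length) :
    PySem.Set.contains
      ((PySem.List.enumerate sentence).foldl (fun s p =>
        if p.2.2 == "PROPN" && pyIsCap p.2.1 then
          PySem.Set.add (PySem.Set.add s (p.1 - 1)) (p.1 + 1)
        else s) PySem.Set.empty) (k : Int)
    = ((decide (0 < (k : Int)) && (PySem.List.pyGetD sentence ((k : Int) - 1) ("", "")).2 == "PROPN"
          && pyIsCap (PySem.List.pyGetD sentence ((k : Int) - 1) ("", "")).1)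
       || (decide ((k : Int) < (sentence.length : Int) - 1)
          && (PySem.List.pyGetD sentence ((k : Int) + 1) ("", "")).2 == "PROPN"
          && pyIsCap (PySem.List.pyGetD sentence ((k : Int) + 1) ("", "")).1)) := by
  have hget : ∀ (m : Nat) (hm : m < sentence.length),
      PySem.List.pyGetD sentence ((m : Nat) : Int) ("", "") = sentence[m] := by
    intro m hm
    rw [PySem.List.pyGetD_natCast]
    simp [List.getD, List.getElem?_eq_getElem hm]
  rw [Bool.eq_iff_iff, PySem.Set.contains_iff, mem_mark_foldl]
  constructor
  · rintro (hs | ⟨p, hpl, hc, hi⟩)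
    · simp [PySem.Set.empty] at hs
    · rcases (PySem.List.mem_enumerate_iff sentence 0 p).1 hpl with ⟨m, hm, rfl⟩
      simp only [zero_add] at hc hi ⊢
      rcases hi with h1 | h2
      · -- k = m - 1, so m = k + 1 (next neighbour)
        have hmk : m = k + 1 := by omega
        subst hmk
        have hlt : decide ((k : Int) < (sentence.length : Int) - 1) = true := by
          simp; omega
        have : ((k : Int) + 1) = ((k + 1 : Nat) : Int) := by push_cast; ring
        rw [this, hget (k + 1) hm]
        simp only [Bool.or_eq_true, Bool.and_eq_true] at *
        right
        refine ⟨⟨by simpa using hlt, hc.1⟩, hc.2⟩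
      · -- k = m + 1, so m = k - 1 (prev neighbour)
        have hk0 : 0 < k := by omega
        have hmk : m = k - 1 := by omega
        subst hmk
        have : ((k : Int) - 1) = ((k - 1 : Nat) : Int) := by omega
        rw [this, hget (k - 1) hm]
        simp only [Bool.or_eq_true, Bool.and_eq_true] at *
        left
        exact ⟨⟨by simp; omega, hc.1⟩, hc.2⟩
  · intro h
    right
    simp only [Bool.or_eq_true, Bool.and_eq_true, decide_eq_true_eq] at h
    rcases h with ⟨⟨hk0, hprop⟩, hcap⟩ | ⟨⟨hlt, hprop⟩, hcap⟩
    · -- prev anchor at k - 1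
      have hm : k - 1 < sentence.length := by omega
      refine ⟨(((k - 1 : Nat) : Int), sentence[k - 1]), ?_, ?_, ?_⟩
      · exact (PySem.List.mem_enumerate_iff sentence 0 _).2 ⟨k - 1, hm, by simp⟩
      · have hc : ((k : Int) - 1) = ((k - 1 : Nat) : Int) := by omega
        rw [hc, hget (k - 1) hm] at hprop hcap
        simp [hprop, hcap]
      · right; omega
    · -- next anchor at k + 1
      have hm : k + 1 < sentence.length := by omega
      refine ⟨(((k + 1 : Nat) : Int), sentence[k + 1]), ?_, ?_, ?_⟩
      · exact (PySem.List.mem_enumerate_iff sentence 0 _).2 ⟨k + 1, hm, by simp⟩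
      · have hc : ((k : Int) + 1) = ((k + 1 : Nat) : Int) := by push_cast; ring
        rw [hc, hget (k + 1) hm] at hprop hcap
        simp [hprop, hcap]
      · left; push_cast; omega

-- ===== VERDICT (by name: the statement is the Claim_ definition above) =====
theorem nl_multiword_propn_py_spec : Claim_equal_nl_multiword_propn_py := by
  intro sentence _
  show nl_multiword_propn_py sentence = nl_multiword_propn_py_alt sentence
  unfold nl_multiword_propn_py nl_multiword_propn_py_alt
  rw [PySem.List.foldl_append_singleton_eq_map]
  simp only [List.nil_append]
  apply List.map_congr_left
  intro p hp
  rcases (PySem.List.mem_enumerate_iff sentence 0 p).1 hp with ⟨k, hk, rfl⟩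
  simp only [zero_add]
  rw [contains_promote sentence k hk]
  cases hc : (sentence[k].2 == "NOUN" && pyIsCap sentence[k].1) <;>
    cases hP : ((decide (0 < (k : Int)) && (PySem.List.pyGetD sentence ((k : Int) - 1) ("", "")).2 == "PROPN"
          && pyIsCap (PySem.List.pyGetD sentence ((k : Int) - 1) ("", "")).1)
       || (decide ((k : Int) < (sentence.length : Int) - 1)
          && (PySem.List.pyGetD sentence ((k : Int) + 1) ("", "")).2 == "PROPN"
          && pyIsCap (PySem.List.pyGetD sentence ((k : Int) + 1) ("", "")).1)) <;>
    simp_all
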